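-- pv_equiv track=rewrite | github.com/Mawiszus/TOAD-GAN | reachability.py | remove_ignored
-- ===== SOURCE A (Python) =====
-- empty = '-'
--
-- ignored = ['M', 'F', '|', 'E', 'g', 'k', 'r', 'y', 'G', 'K', 'R', 'Y', '*', 'B', 'o']
--
-- def remove_ignored(level):
--     """
--     Replaces all ignored tokens with the empty token in a level. In case of Mario and the flag the coordinates of the blocks below are returned and they are also replaced.
--     :param level: a level in ASCII form
--     :return: the level in ASCII form with the ignored tokens replaced and the coordinates of the block below Mario and the flag if existing
--     """
--     new_level = []
--     mario = (-1, -1)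
--     flag = (-1, -1)
--
--     for i, row in enumerate(level):
--         mario_y = row.find('M')
--         if mario_y >= 0:
--             mario = (i + 1, mario_y)
--         flag_y = row.find('F')
--         if flag_y >= 0:
--             flag = (i + 1, flag_y)
--         for token in ignored:
--             row = row.replace(token, empty)
--         new_level.append(row)
--
--     return new_level, mario, flag
-- ===== SOURCE B (Python) =====
-- empty = '-'
--
-- ignored = ['M', 'F', '|', 'E', 'g', 'k', 'r', 'y', 'G', 'K', 'R', 'Y', '*', 'B', 'o']
--
-- def remove_ignored(level):
--     ign = set(ignored)
--     new_level = []
--     mario = (-1, -1)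
--     flag = (-1, -1)
--     for i, row in enumerate(level):
--         chars = []
--         mario_y = -1
--         flag_y = -1
--         for j, ch in enumerate(row):
--             if ch == 'M' and mario_y < 0:
--                 mario_y = j
--             if ch == 'F' and flag_y < 0:
--                 flag_y = j
--             chars.append(empty if ch in ign else ch)
--         if mario_y >= 0:
--             mario = (i + 1, mario_y)
--         if flag_y >= 0:
--             flag = (i + 1, flag_y)
--         new_level.append(''.join(chars))
--     return new_level, mario, flag
-- ===== Notes on version B (the rewrite author's own statement) =====
-- stated objective: simpler
-- what changed: Each row is transformed in one indexed character pass that records the first 'M'/'F' index and substitutes '-' for set-membership hits, replacing A's two find() scans plus fifteen replace() passes per row.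
import Mathlib
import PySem

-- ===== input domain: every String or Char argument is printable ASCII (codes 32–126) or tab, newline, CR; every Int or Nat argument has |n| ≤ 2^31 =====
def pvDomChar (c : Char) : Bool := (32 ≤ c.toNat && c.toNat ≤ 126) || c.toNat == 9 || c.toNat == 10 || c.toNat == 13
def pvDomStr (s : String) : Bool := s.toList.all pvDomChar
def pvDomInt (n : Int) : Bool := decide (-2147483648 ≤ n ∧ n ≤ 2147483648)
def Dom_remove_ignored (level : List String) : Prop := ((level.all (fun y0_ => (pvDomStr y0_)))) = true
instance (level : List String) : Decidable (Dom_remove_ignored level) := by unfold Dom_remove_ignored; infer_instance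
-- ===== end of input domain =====

-- B rebuilds each row in one indexed character pass (recording the first 'M'/'F' index and
-- mapping ignored characters to '-') instead of A's two find() scans plus 15 replace() passes; objective: simpler.

-- module constant: ignored = ['M','F','|','E','g','k','r','y','G','K','R','Y','*','B','o'] (1-char tokens, ported as Chars)
def pvIgnored : List Char := ['M', 'F', '|', 'E', 'g', 'k', 'r', 'y', 'G', 'K', 'R', 'Y', '*', 'B', 'o']

-- ===== PORT A =====
def remove_ignored (level : List String) : List String × (Int × Int) × (Int × Int) :=
  (PySem.List.enumerate level 0).foldl
    (fun st p =>
      let mario_y := PySem.Str.find p.2 "M"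
      let mario := if mario_y ≥ 0 then (p.1 + 1, mario_y) else st.2.1
      let flag_y := PySem.Str.find p.2 "F"
      let flag := if flag_y ≥ 0 then (p.1 + 1, flag_y) else st.2.2
      let row' := pvIgnored.foldl (fun r t => PySem.Str.replace r (String.ofList [t]) "-") p.2
      (st.1 ++ [row'], mario, flag))
    ([], (-1, -1), (-1, -1))

-- ===== PORT B =====
-- ign = set(ignored)
def pvIgnSet : PySem.Set Char := PySem.Set.ofList pvIgnored

-- body of B's inner 'for j, ch in enumerate(row)' loop; state = (chars, mario_y, flag_y)
def pvRowStep (st : List Char × Int × Int) (p : Int × Char) : List Char × Int × Int :=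
  (st.1 ++ [if p.2 ∈ pvIgnSet then '-' else p.2],
   if p.2 = 'M' ∧ st.2.1 < 0 then p.1 else st.2.1,
   if p.2 = 'F' ∧ st.2.2 < 0 then p.1 else st.2.2)

def remove_ignored_alt (level : List String) : List String × (Int × Int) × (Int × Int) :=
  (PySem.List.enumerate level 0).foldl
    (fun st p =>
      let r := (PySem.List.enumerate p.2.toList 0).foldl pvRowStep ([], -1, -1)
      let mario := if r.2.1 ≥ 0 then (p.1 + 1, r.2.1) else st.2.1
      let flag := if r.2.2 ≥ 0 then (p.1 + 1, r.2.2) else st.2.2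
      -- ''.join(chars) over the collected single characters = the string of those characters (exact)
      (st.1 ++ [String.ofList r.1], mario, flag))
    ([], (-1, -1), (-1, -1))

-- ===== PRECONDITION & SPEC =====
def Spec_remove_ignored (level : List String) (out : List String × (Int × Int) × (Int × Int)) : Prop := out = remove_ignored_alt level
instance (level : List String) (out : List String × (Int × Int) × (Int × Int)) : Decidable (Spec_remove_ignored level out) := by unfold Spec_remove_ignored; infer_instance

-- ===== CLAIM (what is proved, stated in full; the proofs are below) =====
def Claim_equal_remove_ignored : Prop := ∀ (level : List String), Dom_remove_ignored level → Spec_remove_ignored level (remove_ignored level)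

-- ===== LEMMAS AND PROOFS =====

-- single-character replace is a map over the characters
theorem pv_replace_go_single (a b : Char) :
    ∀ (s : List Char) (fuel : Nat) (acc : List Char), s.length ≤ fuel →
      PySem.Chars.replace.go [a] [b] fuel s acc
        = acc.reverse ++ s.map (fun c => if c = a then b else c) := by
  intro s
  induction s with
  | nil =>
      intro fuel acc _
      cases fuel <;> simp [PySem.Chars.replace.go]
  | cons c t ih =>
      intro fuel acc hf
      cases fuel with
      | zero => simp at hf
      | succ n =>
          rw [PySem.Chars.replace.go]
          have hlen : t.length ≤ n := by simpa using hf
          by_cases hc : c = a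
          · have hp : [a].isPrefixOf (c :: t) = true := by simp [List.isPrefixOf, hc]
            rw [if_pos hp]
            rw [show List.drop [a].length (c :: t) = t from by simp]
            rw [show ([b].reverse ++ acc) = b :: acc from by simp]
            rw [ih n (b :: acc) hlen]
            simp [hc]
          · have hne : a ≠ c := fun h => hc h.symm
            have hp : [a].isPrefixOf (c :: t) = false := by simp [List.isPrefixOf, hne]
            rw [if_neg (by simp [hp])]
            rw [ih n (c :: acc) hlen]
            simp [hc]

theorem pv_replace_single (a b : Char) (s : List Char) :
    PySem.Chars.replace s [a] [b] = s.map (fun c => if c = a then b else c) := by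
  rw [PySem.Chars.replace]
  simpa using pv_replace_go_single a b s s.length [] le_rfl

-- A's chain of 1-char replaces (on the character lists) is one map
theorem pv_chain_replace (ts : List Char) :
    ∀ (s : List Char),
      ts.foldl (fun r t => PySem.Chars.replace r [t] ['-']) s
        = s.map (fun c => if c ∈ ts then '-' else c) := by
  induction ts with
  | nil => intro s; simp
  | cons t ts ih =>
      intro s
      rw [List.foldl_cons, pv_replace_single, ih, List.map_map]
      apply List.map_congr_left
      intro c _
      by_cases hc : c = t <;> by_cases hm : c ∈ ts <;> simp [Function.comp, hc, hm]

-- the same chain on the String side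
theorem pv_chain_replace_str (ts : List Char) :
    ∀ (r : String),
      (ts.foldl (fun r t => PySem.Str.replace r (String.ofList [t]) "-") r).toList
        = ts.foldl (fun l t => PySem.Chars.replace l [t] ['-']) r.toList := by
  induction ts with
  | nil => intro r; rfl
  | cons t ts ih =>
      intro r
      rw [List.foldl_cons, List.foldl_cons, ih]
      congr 1
      rw [PySem.Str.toList_replace, String.toList_ofList,
        show ("-" : String).toList = ['-'] from by decide]

-- find.go on a 1-char needle, cons step
theorem pv_find_go_cons (a c : Char) (t : List Char) (k : Nat) :
    PySem.Chars.find.go [a] (c :: t) k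
      = if c = a then (k : Int) else PySem.Chars.find.go [a] t (k + 1) := by
  rw [PySem.Chars.find.go]
  by_cases hc : c = a
  · have hp : [a].isPrefixOf (c :: t) = true := by simp [List.isPrefixOf, hc]
    rw [if_pos hp, if_pos hc]
  · have hne : a ≠ c := fun h => hc h.symm
    have hp : [a].isPrefixOf (c :: t) = false := by simp [List.isPrefixOf, hne]
    rw [if_neg (by simp [hp]), if_neg hc]

-- B's inner row loop, characterised: chars is a map, mario_y/flag_y are find.go (first occurrence)
theorem pv_row_fold :
    ∀ (cs : List Char) (k : Nat) (out : List Char) (mY fY : Int),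
      (mY = -1 ∨ 0 ≤ mY) → (fY = -1 ∨ 0 ≤ fY) →
      (PySem.List.enumerate cs (k : Int)).foldl pvRowStep (out, mY, fY)
        = (out ++ cs.map (fun c => if c ∈ pvIgnSet then '-' else c),
           if 0 ≤ mY then mY else PySem.Chars.find.go ['M'] cs k,
           if 0 ≤ fY then fY else PySem.Chars.find.go ['F'] cs k) := by
  intro cs
  induction cs with
  | nil =>
      intro k out mY fY hm hf
      rw [PySem.Chars.find.go, PySem.Chars.find.go]
      rcases hm with hm | hm <;> rcases hf with hf | hf <;>
        simp [PySem.List.enumerate_nil, hm, hf]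
  | cons c t ih =>
      intro k out mY fY hm hf
      rw [PySem.List.enumerate_cons, List.foldl_cons, pv_find_go_cons, pv_find_go_cons]
      have hstep : pvRowStep (out, mY, fY) ((k : Int), c)
          = (out ++ [if c ∈ pvIgnSet then '-' else c],
             if c = 'M' ∧ mY < 0 then (k : Int) else mY,
             if c = 'F' ∧ fY < 0 then (k : Int) else fY) := rfl
      rw [hstep]
      have hk1 : (k : Int) + 1 = ((k + 1 : Nat) : Int) := by push_cast; ring
      rw [hk1, ih (k + 1) _ _ _ ?_ ?_]
      · refine Prod.ext ?_ (Prod.ext ?_ ?_)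
        · simp
        · show (if 0 ≤ (if c = 'M' ∧ mY < 0 then (k : Int) else mY) then _ else _) = _
          by_cases hcM : c = 'M'
          · by_cases h0 : mY < 0
            · simp [hcM, h0, show ¬ (0 ≤ mY) from by omega]
            · simp [hcM, h0, show (0:Int) ≤ mY from by omega]
          · simp [hcM]
        · show (if 0 ≤ (if c = 'F' ∧ fY < 0 then (k : Int) else fY) then _ else _) = _
          by_cases hcF : c = 'F'
          · by_cases h0 : fY < 0
            · simp [hcF, h0, show ¬ (0 ≤ fY) from by omega]
            · simp [hcF, h0, show (0:Int) ≤ fY from by omega]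
          · simp [hcF]
      · split_ifs with h
        · exact Or.inr (Int.natCast_nonneg k)
        · exact hm
      · split_ifs with h
        · exact Or.inr (Int.natCast_nonneg k)
        · exact hf

-- the two outer loop bodies agree on every state and row
theorem pv_step_eq :
    ∀ (st : List String × (Int × Int) × (Int × Int)) (p : Int × String),
      (let mario_y := PySem.Str.find p.2 "M"
       let mario := if mario_y ≥ 0 then (p.1 + 1, mario_y) else st.2.1
       let flag_y := PySem.Str.find p.2 "F"
       let flag := if flag_y ≥ 0 then (p.1 + 1, flag_y) else st.2.2
       let row' := pvIgnored.foldl (fun r t => PySem.Str.replace r (String.ofList [t]) "-") p.2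
       ((st.1 ++ [row'], mario, flag) : List String × (Int × Int) × (Int × Int)))
      = (let r := (PySem.List.enumerate p.2.toList 0).foldl pvRowStep ([], -1, -1)
         let mario := if r.2.1 ≥ 0 then (p.1 + 1, r.2.1) else st.2.1
         let flag := if r.2.2 ≥ 0 then (p.1 + 1, r.2.2) else st.2.2
         (st.1 ++ [String.ofList r.1], mario, flag)) := by
  intro st p
  have hrow := pv_row_fold p.2.toList 0 [] (-1) (-1) (Or.inl rfl) (Or.inl rfl)
  rw [show ((0 : Nat) : Int) = 0 from rfl] at hrow
  have hM : PySem.Str.find p.2 "M" = PySem.Chars.find.go ['M'] p.2.toList 0 := by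
    rw [PySem.Str.find_eq, show ("M" : String).toList = ['M'] from by decide, PySem.Chars.find]
  have hF : PySem.Str.find p.2 "F" = PySem.Chars.find.go ['F'] p.2.toList 0 := by
    rw [PySem.Str.find_eq, show ("F" : String).toList = ['F'] from by decide, PySem.Chars.find]
  have hrow' : pvIgnored.foldl (fun r t => PySem.Str.replace r (String.ofList [t]) "-") p.2
      = String.ofList (p.2.toList.map (fun c => if c ∈ pvIgnSet then '-' else c)) := by
    rw [← String.toList_inj, String.toList_ofList, pv_chain_replace_str, pv_chain_replace]
    apply List.map_congr_left
    intro c _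
    have hmem : c ∈ pvIgnored ↔ c ∈ pvIgnSet := by
      rw [pvIgnSet, PySem.Set.mem_ofList]
    by_cases hc : c ∈ pvIgnored <;> simp [hc, hmem.symm]
  dsimp only
  rw [hrow, hM, hF, hrow']
  simp

-- the outer folds agree for every suffix and state
theorem pv_outer :
    ∀ (l : List (Int × String)) (st : List String × (Int × Int) × (Int × Int)),
      l.foldl
        (fun st p =>
          let mario_y := PySem.Str.find p.2 "M"
          let mario := if mario_y ≥ 0 then (p.1 + 1, mario_y) else st.2.1
          let flag_y := PySem.Str.find p.2 "F"
          let flag := if flag_y ≥ 0 then (p.1 + 1, flag_y) else st.2.2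
          let row' := pvIgnored.foldl (fun r t => PySem.Str.replace r (String.ofList [t]) "-") p.2
          (st.1 ++ [row'], mario, flag)) st
      = l.foldl
        (fun st p =>
          let r := (PySem.List.enumerate p.2.toList 0).foldl pvRowStep ([], -1, -1)
          let mario := if r.2.1 ≥ 0 then (p.1 + 1, r.2.1) else st.2.1
          let flag := if r.2.2 ≥ 0 then (p.1 + 1, r.2.2) else st.2.2
          (st.1 ++ [String.ofList r.1], mario, flag)) st := by
  intro l
  induction l with
  | nil => intro st; simp only [List.foldl_nil]
  | cons p l ih =>
      intro st
      rw [List.foldl_cons, List.foldl_cons, pv_step_eq st p]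
      exact ih _

-- ===== VERDICT (by name: the statement is the Claim_ definition above) =====
theorem remove_ignored_spec : Claim_equal_remove_ignored := by
  intro level _
  show remove_ignored level = remove_ignored_alt level
  rw [remove_ignored, remove_ignored_alt]
  exact pv_outer (PySem.List.enumerate level 0) ([], (-1, -1), (-1, -1))
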